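-- pv_equiv track=rewrite | github.com/Minkov/python_advanced_2021_01 | tuples_and_sets/lab/softuni_party.py | separate_into_vip_and_regular
-- ===== SOURCE A (Python) =====
-- def is_vip_guest(guest):
--     return guest[0].isdigit()
--
-- def separate_into_vip_and_regular(guests):
--     vip_guests = []
--     regular_guests = []
--     for guest in guests:
--         if is_vip_guest(guest):
--             vip_guests.append(guest)
--         else:
--             regular_guests.append(guest)
--     return (sorted(vip_guests), sorted(regular_guests))
-- ===== SOURCE B (Python) =====
-- def is_vip_guest(guest):
--     return guest[0].isdigit()
--
-- def separate_into_vip_and_regular(guests):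
--     ordered = sorted(guests)
--     vip_guests = [guest for guest in ordered if is_vip_guest(guest)]
--     regular_guests = [guest for guest in ordered if not is_vip_guest(guest)]
--     return (vip_guests, regular_guests)
-- ===== Notes on version B (the rewrite author's own statement) =====
-- stated objective: alternative
-- what changed: B sorts the whole guest list once and then filters it into VIP and regular sublists, instead of partitioning first and running two separate sorts; correctness relies on filtering preserving sortedness.
import Mathlib
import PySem

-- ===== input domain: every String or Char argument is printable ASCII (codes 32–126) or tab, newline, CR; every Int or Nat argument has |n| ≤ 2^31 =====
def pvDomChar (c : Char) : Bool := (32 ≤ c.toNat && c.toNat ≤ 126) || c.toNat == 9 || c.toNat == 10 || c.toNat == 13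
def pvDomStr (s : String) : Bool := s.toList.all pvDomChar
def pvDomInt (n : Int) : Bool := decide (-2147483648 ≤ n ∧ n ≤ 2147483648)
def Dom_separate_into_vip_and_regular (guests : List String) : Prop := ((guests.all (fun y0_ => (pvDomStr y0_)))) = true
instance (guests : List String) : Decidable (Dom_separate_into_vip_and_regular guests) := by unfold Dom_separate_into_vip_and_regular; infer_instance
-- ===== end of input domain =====

-- B sorts the whole guest list once and then filters it into VIP/regular, instead of partitioning first and sorting each part.

-- ===== PORT A =====
-- guest[0].isdigit(): index 0 of the string, then digit test (exact on ASCII domain)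
def is_vip_guest (guest : String) : Bool :=
  match PySem.Str.pyGet? guest 0 with
  | some c => PySem.Chars.isdigit c
  | none => false

def separate_into_vip_and_regular (guests : List String) : List String × List String :=
  let acc := guests.foldl
    (fun (acc : List String × List String) guest =>
      if is_vip_guest guest then (acc.1 ++ [guest], acc.2) else (acc.1, acc.2 ++ [guest]))
    ([], [])
  (PySem.List.sorted acc.1 (fun x => x) false, PySem.List.sorted acc.2 (fun x => x) false)

-- ===== PORT B =====
def separate_into_vip_and_regular_alt (guests : List String) : List String × List String :=
  let ordered := PySem.List.sorted guests (fun x => x) false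
  (ordered.filter (fun guest => is_vip_guest guest),
   ordered.filter (fun guest => !is_vip_guest guest))

-- ===== PRECONDITION & SPEC =====
-- Pre_ excludes lists containing the empty string, on which Python's guest[0] raises IndexError.
def Pre_separate_into_vip_and_regular (guests : List String) : Prop :=
  ∀ g ∈ guests, g ≠ ""
instance (guests : List String) : Decidable (Pre_separate_into_vip_and_regular guests) := by
  unfold Pre_separate_into_vip_and_regular; infer_instance

def pvWitness_separate_into_vip_and_regular : List String := ["7abc", "Tom", "1x", "ann"]

def Spec_separate_into_vip_and_regular (guests : List String) (out : List String × List String) : Prop := out = separate_into_vip_and_regular_alt guests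
instance (guests : List String) (out : List String × List String) : Decidable (Spec_separate_into_vip_and_regular guests out) := by unfold Spec_separate_into_vip_and_regular; infer_instance

-- ===== CLAIM (what is proved, stated in full; the proofs are below) =====
def Claim_equal_separate_into_vip_and_regular : Prop := ∀ (guests : List String), Dom_separate_into_vip_and_regular guests → Pre_separate_into_vip_and_regular guests → Spec_separate_into_vip_and_regular guests (separate_into_vip_and_regular guests)

-- ===== LEMMAS AND PROOFS =====

-- A's append-partition fold computes (filter p, filter !p).
theorem foldl_partition_eq (p : String → Bool) (xs : List String) (v r : List String) :
    xs.foldl (fun (acc : List String × List String) g =>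
      if p g then (acc.1 ++ [g], acc.2) else (acc.1, acc.2 ++ [g])) (v, r)
    = (v ++ xs.filter p, r ++ xs.filter (fun g => !p g)) := by
  induction xs generalizing v r with
  | nil => simp
  | cons x xs ih =>
    by_cases h : p x <;> simp [List.foldl_cons, h, ih]

-- filtering a sorted list yields the sorted filtered list (sort stability on a linear order).
theorem filter_sorted_eq (p : String → Bool) (xs : List String) :
    (PySem.List.sorted xs (fun x => x) false).filter p
      = PySem.List.sorted (xs.filter p) (fun x => x) false := by
  apply PySem.List.eq_of_perm_of_pairwise_le_of_injective (fun x : String => x)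
    (fun _ _ h => h)
  · exact ((PySem.List.sorted_perm xs (fun x => x) false).filter p).trans
      (PySem.List.sorted_perm (xs.filter p) (fun x => x) false).symm
  · exact List.Pairwise.sublist (List.filter_sublist)
      (PySem.List.sorted_pairwise xs (fun x => x))
  · exact PySem.List.sorted_pairwise (xs.filter p) (fun x => x)

-- ===== VERDICT (by name: the statement is the Claim_ definition above) =====
theorem separate_into_vip_and_regular_spec : Claim_equal_separate_into_vip_and_regular := by
  intro guests _ _
  unfold Spec_separate_into_vip_and_regular separate_into_vip_and_regular
    separate_into_vip_and_regular_alt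
  simp only [foldl_partition_eq, List.nil_append, filter_sorted_eq]
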